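-- pv_equiv track=rewrite | github.com/fengfeng-zi/recipe-ai-meal-planner | memory_rag_lab/src/memory_rag_lab/vision.py | _guess_meal_type
-- ===== SOURCE A (Python) =====
-- MEAL_TYPES = ("breakfast", "lunch", "dinner", "snack")
--
-- def _guess_meal_type(tokens: list[str]) -> str:
--     for meal_type in MEAL_TYPES:
--         if meal_type in tokens:
--             return meal_type
--     if any(token in tokens for token in ("oats", "yogurt", "egg", "wrap")):
--         return "breakfast"
--     if any(token in tokens for token in ("salad", "bowl", "quinoa")):
--         return "lunch"
--     if any(token in tokens for token in ("salmon", "tray", "stir", "grilled")):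
--         return "dinner"
--     return "meal"
-- ===== SOURCE B (Python) =====
-- _PRIORITY = {
--     "breakfast": (0, "breakfast"),
--     "lunch": (1, "lunch"),
--     "dinner": (2, "dinner"),
--     "snack": (3, "snack"),
--     "oats": (4, "breakfast"), "yogurt": (4, "breakfast"),
--     "egg": (4, "breakfast"), "wrap": (4, "breakfast"),
--     "salad": (5, "lunch"), "bowl": (5, "lunch"), "quinoa": (5, "lunch"),
--     "salmon": (6, "dinner"), "tray": (6, "dinner"),
--     "stir": (6, "dinner"), "grilled": (6, "dinner"),
-- }
--
-- def _guess_meal_type(tokens: list[str]) -> str: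
--     best = None
--     for tok in tokens:
--         entry = _PRIORITY.get(tok)
--         if entry is not None and (best is None or entry[0] < best[0]):
--             best = entry
--     return "meal" if best is None else best[1]
-- ===== Notes on version B (the rewrite author's own statement) =====
-- stated objective: faster
-- what changed: Replaces the rule-by-rule membership scans (each rule scanning the token list) with one dict mapping each trigger to (priority rank, label) and a single pass over tokens keeping the minimum-rank entry.
import Mathlib
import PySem

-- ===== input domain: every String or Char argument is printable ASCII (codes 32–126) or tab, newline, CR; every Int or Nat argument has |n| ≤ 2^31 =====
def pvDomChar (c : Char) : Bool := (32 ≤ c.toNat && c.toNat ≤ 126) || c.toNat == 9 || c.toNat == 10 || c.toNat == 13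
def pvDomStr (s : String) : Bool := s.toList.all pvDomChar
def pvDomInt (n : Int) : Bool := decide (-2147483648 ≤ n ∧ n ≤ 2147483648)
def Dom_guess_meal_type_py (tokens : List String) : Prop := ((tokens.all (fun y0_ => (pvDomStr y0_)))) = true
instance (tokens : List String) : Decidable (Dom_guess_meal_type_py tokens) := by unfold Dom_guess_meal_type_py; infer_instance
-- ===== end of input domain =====

-- B replaces A's rule-by-rule membership scans with one trigger→(rank,label) dict and a single
-- min-rank pass over the tokens (alternative decomposition; same observable behaviour).

-- ===== PORT A =====
def pvMEAL_TYPES : List String := ["breakfast", "lunch", "dinner", "snack"]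

-- the 'for meal_type in MEAL_TYPES: if meal_type in tokens: return meal_type' loop
def pvMealLoop (meal_types tokens : List String) : Option String :=
  match meal_types with
  | [] => none
  | m :: rest => if tokens.contains m then some m else pvMealLoop rest tokens

def guess_meal_type_py (tokens : List String) : String :=
  match pvMealLoop pvMEAL_TYPES tokens with
  | some m => m
  | none =>
    if (["oats", "yogurt", "egg", "wrap"] : List String).any (fun token => tokens.contains token) then "breakfast"
    else if (["salad", "bowl", "quinoa"] : List String).any (fun token => tokens.contains token) then "lunch"
    else if (["salmon", "tray", "stir", "grilled"] : List String).any (fun token => tokens.contains token) then "dinner"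
    else "meal"

-- ===== PORT B =====
def pvPriority : PySem.Dict String (Int × String) := PySem.Dict.ofList
  [("breakfast", (0, "breakfast")), ("lunch", (1, "lunch")), ("dinner", (2, "dinner")),
   ("snack", (3, "snack")),
   ("oats", (4, "breakfast")), ("yogurt", (4, "breakfast")), ("egg", (4, "breakfast")),
   ("wrap", (4, "breakfast")),
   ("salad", (5, "lunch")), ("bowl", (5, "lunch")), ("quinoa", (5, "lunch")),
   ("salmon", (6, "dinner")), ("tray", (6, "dinner")), ("stir", (6, "dinner")),
   ("grilled", (6, "dinner"))]

-- the loop body: entry = _PRIORITY.get(tok); if entry is not None and (best is None or entry[0] < best[0]): best = entry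
def pvStep (best : Option (Int × String)) (tok : String) : Option (Int × String) :=
  match pvPriority.get? tok with
  | none => best
  | some entry =>
    match best with
    | none => some entry
    | some b => if entry.1 < b.1 then some entry else best

def guess_meal_type_py_alt (tokens : List String) : String :=
  match tokens.foldl pvStep none with
  | none => "meal"
  | some best => best.2

-- ===== PRECONDITION & SPEC =====
def Spec_guess_meal_type_py (tokens : List String) (out : String) : Prop := out = guess_meal_type_py_alt tokens
instance (tokens : List String) (out : String) : Decidable (Spec_guess_meal_type_py tokens out) := by unfold Spec_guess_meal_type_py; infer_instance

-- ===== CLAIM (what is proved, stated in full; the proofs are below) =====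
def Claim_equal_guess_meal_type_py : Prop := ∀ (tokens : List String), Dom_guess_meal_type_py tokens → Spec_guess_meal_type_py tokens (guess_meal_type_py tokens)

-- ===== LEMMAS AND PROOFS =====

set_option maxHeartbeats 4000000 in
theorem pvPriority_eq_mk : pvPriority = PySem.Dict.mk
    [("breakfast", (0, "breakfast")), ("lunch", (1, "lunch")), ("dinner", (2, "dinner")),
     ("snack", (3, "snack")),
     ("oats", (4, "breakfast")), ("yogurt", (4, "breakfast")), ("egg", (4, "breakfast")),
     ("wrap", (4, "breakfast")),
     ("salad", (5, "lunch")), ("bowl", (5, "lunch")), ("quinoa", (5, "lunch")),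
     ("salmon", (6, "dinner")), ("tray", (6, "dinner")), ("stir", (6, "dinner")),
     ("grilled", (6, "dinner"))] := by decide

-- inversion: a successful dict lookup pins the token to one of the 15 trigger strings
theorem pvPrio_inv (t : String) (e : Int × String) (h : pvPriority.get? t = some e) :
    (t = "breakfast" ∧ e = (0, "breakfast")) ∨ (t = "lunch" ∧ e = (1, "lunch")) ∨
    (t = "dinner" ∧ e = (2, "dinner")) ∨ (t = "snack" ∧ e = (3, "snack")) ∨
    (t = "oats" ∧ e = (4, "breakfast")) ∨ (t = "yogurt" ∧ e = (4, "breakfast")) ∨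
    (t = "egg" ∧ e = (4, "breakfast")) ∨ (t = "wrap" ∧ e = (4, "breakfast")) ∨
    (t = "salad" ∧ e = (5, "lunch")) ∨ (t = "bowl" ∧ e = (5, "lunch")) ∨
    (t = "quinoa" ∧ e = (5, "lunch")) ∨
    (t = "salmon" ∧ e = (6, "dinner")) ∨ (t = "tray" ∧ e = (6, "dinner")) ∨
    (t = "stir" ∧ e = (6, "dinner")) ∨ (t = "grilled" ∧ e = (6, "dinner")) := by
  have hm : (t, e) ∈ pvPriority.items := by
    apply PySem.Dict.mem_items_of_get?_eq_some
    exact h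
  rw [pvPriority_eq_mk] at hm
  simp only [List.mem_cons, List.not_mem_nil, or_false, Prod.mk.injEq] at hm
  tauto

-- the 15 trigger lookups, evaluated once
theorem pvGet_breakfast : pvPriority.get? "breakfast" = some (0, "breakfast") := by rw [pvPriority_eq_mk]; rfl
theorem pvGet_lunch : pvPriority.get? "lunch" = some (1, "lunch") := by rw [pvPriority_eq_mk]; rfl
theorem pvGet_dinner : pvPriority.get? "dinner" = some (2, "dinner") := by rw [pvPriority_eq_mk]; rfl
theorem pvGet_snack : pvPriority.get? "snack" = some (3, "snack") := by rw [pvPriority_eq_mk]; rfl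
theorem pvGet_oats : pvPriority.get? "oats" = some (4, "breakfast") := by rw [pvPriority_eq_mk]; rfl
theorem pvGet_yogurt : pvPriority.get? "yogurt" = some (4, "breakfast") := by rw [pvPriority_eq_mk]; rfl
theorem pvGet_egg : pvPriority.get? "egg" = some (4, "breakfast") := by rw [pvPriority_eq_mk]; rfl
theorem pvGet_wrap : pvPriority.get? "wrap" = some (4, "breakfast") := by rw [pvPriority_eq_mk]; rfl
theorem pvGet_salad : pvPriority.get? "salad" = some (5, "lunch") := by rw [pvPriority_eq_mk]; rfl
theorem pvGet_bowl : pvPriority.get? "bowl" = some (5, "lunch") := by rw [pvPriority_eq_mk]; rfl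
theorem pvGet_quinoa : pvPriority.get? "quinoa" = some (5, "lunch") := by rw [pvPriority_eq_mk]; rfl
theorem pvGet_salmon : pvPriority.get? "salmon" = some (6, "dinner") := by rw [pvPriority_eq_mk]; rfl
theorem pvGet_tray : pvPriority.get? "tray" = some (6, "dinner") := by rw [pvPriority_eq_mk]; rfl
theorem pvGet_stir : pvPriority.get? "stir" = some (6, "dinner") := by rw [pvPriority_eq_mk]; rfl
theorem pvGet_grilled : pvPriority.get? "grilled" = some (6, "dinner") := by rw [pvPriority_eq_mk]; rfl

-- a token with a dict entry always turns the accumulator into some value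
theorem pvStep_isSome (acc : Option (Int × String)) (t : String) (entry : Int × String)
    (hp : pvPriority.get? t = some entry) : ∃ b, pvStep acc t = some b := by
  unfold pvStep
  rw [hp]
  rcases acc with _ | b
  · exact ⟨entry, rfl⟩
  · by_cases hc : entry.1 < b.1 <;> simp [hc]

-- once the accumulator is some, the fold stays some
theorem pvFold_isSome (tokens : List String) : ∀ (b : Int × String),
    tokens.foldl pvStep (some b) ≠ none := by
  induction tokens with
  | nil => intro b h; exact absurd h (by simp)
  | cons t ts ih =>
    intro b h
    simp only [List.foldl_cons] at h
    rcases hs : pvStep (some b) t with _ | b'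
    · unfold pvStep at hs
      rcases hp : pvPriority.get? t with _ | entry <;> rw [hp] at hs
      · exact absurd hs (by simp)
      · by_cases hc : entry.1 < b.1 <;> simp [hc] at hs
    · rw [hs] at h
      exact ih b' h

-- result of the fold came either from the accumulator or from some token's dict entry
theorem pvFold_mem (tokens : List String) : ∀ (acc : Option (Int × String)) (e : Int × String),
    tokens.foldl pvStep acc = some e →
    acc = some e ∨ ∃ t ∈ tokens, pvPriority.get? t = some e := by
  induction tokens with
  | nil => intro acc e h; exact Or.inl h
  | cons t ts ih =>
    intro acc e h
    rcases ih (pvStep acc t) e (by simpa using h) with h' | ⟨u, hu, hpu⟩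
    · unfold pvStep at h'
      rcases hp : pvPriority.get? t with _ | entry <;> rw [hp] at h'
      · exact Or.inl h'
      · rcases acc with _ | b
        · exact Or.inr ⟨t, List.mem_cons_self, by rw [hp, Option.some_inj.mp h']⟩
        · by_cases hc : entry.1 < b.1
          · simp only [hc, if_pos] at h'
            exact Or.inr ⟨t, List.mem_cons_self, by rw [hp, Option.some_inj.mp h']⟩
          · simp only [hc, if_neg, not_false_iff] at h'
            exact Or.inl h'
    · exact Or.inr ⟨u, List.mem_cons_of_mem _ hu, hpu⟩

-- one step never increases the rank of the accumulator
theorem pvStep_le (acc : Option (Int × String)) (t : String) (e : Int × String)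
    (h : pvStep acc t = some e) : ∀ b, acc = some b → e.1 ≤ b.1 := by
  intro b hb
  subst hb
  unfold pvStep at h
  rcases hp : pvPriority.get? t with _ | entry <;> rw [hp] at h
  · rw [← Option.some_inj.mp h]
  · by_cases hc : entry.1 < b.1
    · simp only [hc, if_pos] at h
      rw [← Option.some_inj.mp h]; omega
    · simp only [hc, if_neg, not_false_iff] at h
      rw [← Option.some_inj.mp h]

-- the value a step installs is at most the current token's dict rank
theorem pvStep_le_entry (acc : Option (Int × String)) (t : String) (e entry : Int × String)
    (h : pvStep acc t = some e) (hp : pvPriority.get? t = some entry) : e.1 ≤ entry.1 := by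
  unfold pvStep at h
  rw [hp] at h
  rcases acc with _ | b
  · rw [← Option.some_inj.mp h]
  · by_cases hc : entry.1 < b.1
    · simp only [hc, if_pos] at h
      rw [← Option.some_inj.mp h]
    · simp only [hc, if_neg, not_false_iff] at h
      rw [← Option.some_inj.mp h]; omega

-- the fold never increases the rank of the accumulator
theorem pvFold_le (tokens : List String) : ∀ (acc : Option (Int × String)) (e : Int × String),
    tokens.foldl pvStep acc = some e → ∀ b, acc = some b → e.1 ≤ b.1 := by
  induction tokens with
  | nil => intro acc e h b hb; rw [hb] at h; rw [← Option.some_inj.mp h]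
  | cons t ts ih =>
    intro acc e h b hb
    subst hb
    rcases hs : pvStep (some b) t with _ | b'
    · exfalso
      rcases hp : pvPriority.get? t with _ | entry
      · unfold pvStep at hs
        rw [hp] at hs
        exact absurd hs (by simp)
      · rcases pvStep_isSome (some b) t entry hp with ⟨c, hc⟩
        rw [hc] at hs
        exact absurd hs (by simp)
    · have h1 := ih (pvStep (some b) t) e (by simpa using h) b' (by rw [hs])
      have h2 := pvStep_le (some b) t b' hs b rfl
      omega

-- the fold's result rank is a lower bound for every token's dict rank
theorem pvFold_min (tokens : List String) : ∀ (acc : Option (Int × String)) (e : Int × String),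
    tokens.foldl pvStep acc = some e →
    ∀ t ∈ tokens, ∀ entry, pvPriority.get? t = some entry → e.1 ≤ entry.1 := by
  induction tokens with
  | nil => intro _ _ _ t ht; exact absurd ht List.not_mem_nil
  | cons u ts ih =>
    intro acc e h t ht entry hentry
    rcases List.mem_cons.mp ht with rfl | ht'
    · rcases pvStep_isSome acc t entry hentry with ⟨b', hs⟩
      have h1 := pvFold_le ts (pvStep acc t) e (by simpa using h) b' hs
      have h2 := pvStep_le_entry acc t b' entry hs hentry
      omega
    · exact ih (pvStep acc u) e (by simpa using h) t ht' entry hentry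

-- if the fold returns none, no token is in the dict
theorem pvFold_none (tokens : List String) (h : tokens.foldl pvStep none = none) :
    ∀ t ∈ tokens, pvPriority.get? t = none := by
  induction tokens with
  | nil => intro t ht; exact absurd ht List.not_mem_nil
  | cons u ts ih =>
    intro t ht
    have hu : pvStep none u = none := by
      rcases hs : pvStep none u with _ | b'
      · rfl
      · exfalso
        have := pvFold_isSome ts b'
        simp only [List.foldl_cons, hs] at h
        exact this h
    have hun : pvPriority.get? u = none := by
      rcases hp : pvPriority.get? u with _ | entry
      · rfl
      · rcases pvStep_isSome none u entry hp with ⟨b, hb⟩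
        rw [hb] at hu; exact absurd hu (by simp)
    rcases List.mem_cons.mp ht with rfl | ht'
    · exact hun
    · exact ih (by simpa [hu] using h) t ht'

-- a token whose rank is strictly below the fold's minimum cannot occur in tokens
theorem pvNotMem (tokens : List String) (e : Int × String)
    (h : tokens.foldl pvStep none = some e) (w : String) (entry : Int × String)
    (hw : pvPriority.get? w = some entry) (hlt : entry.1 < e.1) :
    w ∉ tokens := by
  intro hmem
  have := pvFold_min tokens none e h w hmem entry hw
  omega

-- ===== VERDICT (by name: the statement is the Claim_ definition above) =====
theorem guess_meal_type_py_spec : Claim_equal_guess_meal_type_py := by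
  intro tokens _
  unfold Spec_guess_meal_type_py guess_meal_type_py_alt
  rcases h : tokens.foldl pvStep none with _ | e
  · -- nothing matched: every dict key is absent from tokens
    have hn := pvFold_none tokens h
    have hf : ∀ (w : String) (e : Int × String), pvPriority.get? w = some e → w ∉ tokens :=
      fun w e hw hmem => by rw [hn w hmem] at hw; cases hw
    simp [guess_meal_type_py, pvMealLoop, pvMEAL_TYPES,
      hf "breakfast" _ pvGet_breakfast, hf "lunch" _ pvGet_lunch, hf "dinner" _ pvGet_dinner,
      hf "snack" _ pvGet_snack, hf "oats" _ pvGet_oats, hf "yogurt" _ pvGet_yogurt,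
      hf "egg" _ pvGet_egg, hf "wrap" _ pvGet_wrap, hf "salad" _ pvGet_salad,
      hf "bowl" _ pvGet_bowl, hf "quinoa" _ pvGet_quinoa, hf "salmon" _ pvGet_salmon,
      hf "tray" _ pvGet_tray, hf "stir" _ pvGet_stir, hf "grilled" _ pvGet_grilled]
  · rcases pvFold_mem tokens none e h with h' | ⟨t, ht, hpt⟩
    · exact absurd h' (by simp)
    · have hlt := pvNotMem tokens e h
      rcases pvPrio_inv t e hpt with ⟨rfl, rfl⟩ | ⟨rfl, rfl⟩ | ⟨rfl, rfl⟩ | ⟨rfl, rfl⟩ |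
        ⟨rfl, rfl⟩ | ⟨rfl, rfl⟩ | ⟨rfl, rfl⟩ | ⟨rfl, rfl⟩ | ⟨rfl, rfl⟩ | ⟨rfl, rfl⟩ |
        ⟨rfl, rfl⟩ | ⟨rfl, rfl⟩ | ⟨rfl, rfl⟩ | ⟨rfl, rfl⟩ | ⟨rfl, rfl⟩
      · simp [guess_meal_type_py,
          pvMealLoop,
          pvMEAL_TYPES,
          ht]
      · simp [guess_meal_type_py,
          pvMealLoop,
          pvMEAL_TYPES,
          ht,
          hlt "breakfast" _ pvGet_breakfast (by decide)]
      · simp [guess_meal_type_py,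
          pvMealLoop,
          pvMEAL_TYPES,
          ht,
          hlt "breakfast" _ pvGet_breakfast (by decide),
          hlt "lunch" _ pvGet_lunch (by decide)]
      · simp [guess_meal_type_py,
          pvMealLoop,
          pvMEAL_TYPES,
          ht,
          hlt "breakfast" _ pvGet_breakfast (by decide),
          hlt "lunch" _ pvGet_lunch (by decide),
          hlt "dinner" _ pvGet_dinner (by decide)]
      · simp [guess_meal_type_py,
          pvMealLoop,
          pvMEAL_TYPES,
          ht,
          hlt "breakfast" _ pvGet_breakfast (by decide),
          hlt "lunch" _ pvGet_lunch (by decide),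
          hlt "dinner" _ pvGet_dinner (by decide),
          hlt "snack" _ pvGet_snack (by decide)]
      · simp [guess_meal_type_py,
          pvMealLoop,
          pvMEAL_TYPES,
          ht,
          hlt "breakfast" _ pvGet_breakfast (by decide),
          hlt "lunch" _ pvGet_lunch (by decide),
          hlt "dinner" _ pvGet_dinner (by decide),
          hlt "snack" _ pvGet_snack (by decide)]
      · simp [guess_meal_type_py,
          pvMealLoop,
          pvMEAL_TYPES,
          ht,
          hlt "breakfast" _ pvGet_breakfast (by decide),
          hlt "lunch" _ pvGet_lunch (by decide),
          hlt "dinner" _ pvGet_dinner (by decide),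
          hlt "snack" _ pvGet_snack (by decide)]
      · simp [guess_meal_type_py,
          pvMealLoop,
          pvMEAL_TYPES,
          ht,
          hlt "breakfast" _ pvGet_breakfast (by decide),
          hlt "lunch" _ pvGet_lunch (by decide),
          hlt "dinner" _ pvGet_dinner (by decide),
          hlt "snack" _ pvGet_snack (by decide)]
      · simp [guess_meal_type_py,
          pvMealLoop,
          pvMEAL_TYPES,
          ht,
          hlt "breakfast" _ pvGet_breakfast (by decide),
          hlt "lunch" _ pvGet_lunch (by decide),
          hlt "dinner" _ pvGet_dinner (by decide),
          hlt "snack" _ pvGet_snack (by decide),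
          hlt "oats" _ pvGet_oats (by decide),
          hlt "yogurt" _ pvGet_yogurt (by decide),
          hlt "egg" _ pvGet_egg (by decide),
          hlt "wrap" _ pvGet_wrap (by decide)]
      · simp [guess_meal_type_py,
          pvMealLoop,
          pvMEAL_TYPES,
          ht,
          hlt "breakfast" _ pvGet_breakfast (by decide),
          hlt "lunch" _ pvGet_lunch (by decide),
          hlt "dinner" _ pvGet_dinner (by decide),
          hlt "snack" _ pvGet_snack (by decide),
          hlt "oats" _ pvGet_oats (by decide),
          hlt "yogurt" _ pvGet_yogurt (by decide),
          hlt "egg" _ pvGet_egg (by decide),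
          hlt "wrap" _ pvGet_wrap (by decide)]
      · simp [guess_meal_type_py,
          pvMealLoop,
          pvMEAL_TYPES,
          ht,
          hlt "breakfast" _ pvGet_breakfast (by decide),
          hlt "lunch" _ pvGet_lunch (by decide),
          hlt "dinner" _ pvGet_dinner (by decide),
          hlt "snack" _ pvGet_snack (by decide),
          hlt "oats" _ pvGet_oats (by decide),
          hlt "yogurt" _ pvGet_yogurt (by decide),
          hlt "egg" _ pvGet_egg (by decide),
          hlt "wrap" _ pvGet_wrap (by decide)]
      · simp [guess_meal_type_py,
          pvMealLoop,
          pvMEAL_TYPES,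
          ht,
          hlt "breakfast" _ pvGet_breakfast (by decide),
          hlt "lunch" _ pvGet_lunch (by decide),
          hlt "dinner" _ pvGet_dinner (by decide),
          hlt "snack" _ pvGet_snack (by decide),
          hlt "oats" _ pvGet_oats (by decide),
          hlt "yogurt" _ pvGet_yogurt (by decide),
          hlt "egg" _ pvGet_egg (by decide),
          hlt "wrap" _ pvGet_wrap (by decide),
          hlt "salad" _ pvGet_salad (by decide),
          hlt "bowl" _ pvGet_bowl (by decide),
          hlt "quinoa" _ pvGet_quinoa (by decide)]
      · simp [guess_meal_type_py,
          pvMealLoop,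
          pvMEAL_TYPES,
          ht,
          hlt "breakfast" _ pvGet_breakfast (by decide),
          hlt "lunch" _ pvGet_lunch (by decide),
          hlt "dinner" _ pvGet_dinner (by decide),
          hlt "snack" _ pvGet_snack (by decide),
          hlt "oats" _ pvGet_oats (by decide),
          hlt "yogurt" _ pvGet_yogurt (by decide),
          hlt "egg" _ pvGet_egg (by decide),
          hlt "wrap" _ pvGet_wrap (by decide),
          hlt "salad" _ pvGet_salad (by decide),
          hlt "bowl" _ pvGet_bowl (by decide),
          hlt "quinoa" _ pvGet_quinoa (by decide)]
      · simp [guess_meal_type_py,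
          pvMealLoop,
          pvMEAL_TYPES,
          ht,
          hlt "breakfast" _ pvGet_breakfast (by decide),
          hlt "lunch" _ pvGet_lunch (by decide),
          hlt "dinner" _ pvGet_dinner (by decide),
          hlt "snack" _ pvGet_snack (by decide),
          hlt "oats" _ pvGet_oats (by decide),
          hlt "yogurt" _ pvGet_yogurt (by decide),
          hlt "egg" _ pvGet_egg (by decide),
          hlt "wrap" _ pvGet_wrap (by decide),
          hlt "salad" _ pvGet_salad (by decide),
          hlt "bowl" _ pvGet_bowl (by decide),
          hlt "quinoa" _ pvGet_quinoa (by decide)]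
      · simp [guess_meal_type_py,
          pvMealLoop,
          pvMEAL_TYPES,
          ht,
          hlt "breakfast" _ pvGet_breakfast (by decide),
          hlt "lunch" _ pvGet_lunch (by decide),
          hlt "dinner" _ pvGet_dinner (by decide),
          hlt "snack" _ pvGet_snack (by decide),
          hlt "oats" _ pvGet_oats (by decide),
          hlt "yogurt" _ pvGet_yogurt (by decide),
          hlt "egg" _ pvGet_egg (by decide),
          hlt "wrap" _ pvGet_wrap (by decide),
          hlt "salad" _ pvGet_salad (by decide),
          hlt "bowl" _ pvGet_bowl (by decide),
          hlt "quinoa" _ pvGet_quinoa (by decide)]
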